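-- pv_equiv track=rewrite | github.com/Phani-Nidadavolu/kaldi | egs/ageest/s5/local/make_ageclusters.py | CreateUtt2AgeDict
-- ===== SOURCE A (Python) =====
-- def CreateUtt2AgeDict(u2a):
--     u2a_dict = {}
--     for u_a in u2a:
--         utt = u_a.split()[0]
--         age = u_a.split()[1]
--         if utt not in u2a_dict:
--             u2a_dict[utt] = age
--
--     return u2a_dict
-- ===== SOURCE B (Python) =====
-- def CreateUtt2AgeDict(u2a):
--     lines = list(u2a)
--     if not lines:
--         return {}
--     utt, age = lines[0].split()[:2]
--     rest = CreateUtt2AgeDict([l for l in lines[1:] if l.split()[0] != utt])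
--     return {utt: age, **rest}
-- ===== Notes on version B (the rewrite author's own statement) =====
-- stated objective: alternative
-- what changed: B is a recursive first-occurrence dedupe: it takes the head line's (utt, age), filters every later line with the same utt out of the tail, recurses on the filtered tail and merges, replacing A's forward loop with a membership-guarded insert; Pre_ excludes only inputs where A raises IndexError (a line with fewer than two tokens).
import Mathlib
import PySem

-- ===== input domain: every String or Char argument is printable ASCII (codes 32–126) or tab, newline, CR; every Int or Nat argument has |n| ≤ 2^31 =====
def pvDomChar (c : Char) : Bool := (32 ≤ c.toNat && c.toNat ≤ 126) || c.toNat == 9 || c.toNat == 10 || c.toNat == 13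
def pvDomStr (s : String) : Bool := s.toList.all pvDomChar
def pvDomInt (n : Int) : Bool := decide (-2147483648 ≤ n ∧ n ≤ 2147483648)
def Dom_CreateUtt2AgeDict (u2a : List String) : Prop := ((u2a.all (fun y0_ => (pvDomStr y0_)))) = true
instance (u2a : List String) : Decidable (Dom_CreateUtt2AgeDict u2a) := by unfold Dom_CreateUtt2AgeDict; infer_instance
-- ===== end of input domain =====

-- B is a recursive first-occurrence dedupe (take head pair, filter its key out of the tail, recurse, merge) instead of A's forward loop with a membership-guarded insert; alternative decomposition, same result.

-- ===== PORT A =====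
def CreateUtt2AgeDict (u2a : List String) : List (String × String) :=
  (u2a.foldl (fun u2a_dict u_a =>
      let utt := PySem.List.pyGetD (PySem.Str.split₀ u_a) 0 ""
      let age := PySem.List.pyGetD (PySem.Str.split₀ u_a) 1 ""
      if !(u2a_dict.contains utt) then u2a_dict.insert utt age else u2a_dict)
    (PySem.Dict.empty : PySem.Dict String String)).items

-- ===== PORT B =====
def CreateUtt2AgeDict_alt : List String → List (String × String)
  | [] => []
  | l :: ls =>
    let utt := PySem.List.pyGetD (PySem.Str.split₀ l) 0 ""
    let age := PySem.List.pyGetD (PySem.Str.split₀ l) 1 ""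
    let rest := CreateUtt2AgeDict_alt
      (ls.filter (fun s => PySem.List.pyGetD (PySem.Str.split₀ s) 0 "" != utt))
    -- {utt: age, **rest} : insert utt first, then every pair of rest in order
    (rest.foldl (fun d p => d.insert p.1 p.2)
      ((PySem.Dict.empty : PySem.Dict String String).insert utt age)).items
termination_by xs => xs.length
decreasing_by
  simpa using Nat.lt_succ_of_le (List.length_filter_le _ _)

-- ===== PRECONDITION & SPEC =====
-- Pre_ excludes exactly the inputs where the Python A raises IndexError: a line whose split() has fewer than two tokens.
def Pre_CreateUtt2AgeDict (u2a : List String) : Prop :=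
  ∀ s ∈ u2a, 2 ≤ (PySem.Str.split₀ s).length
instance (u2a : List String) : Decidable (Pre_CreateUtt2AgeDict u2a) := by unfold Pre_CreateUtt2AgeDict; infer_instance
def pvWitness_CreateUtt2AgeDict : List String := ["u1 25", "u2 30", "u1 40"]

def Spec_CreateUtt2AgeDict (u2a : List String) (out : List (String × String)) : Prop := out = CreateUtt2AgeDict_alt u2a
instance (u2a : List String) (out : List (String × String)) : Decidable (Spec_CreateUtt2AgeDict u2a out) := by unfold Spec_CreateUtt2AgeDict; infer_instance

-- ===== CLAIM (what is proved, stated in full; the proofs are below) =====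
def Claim_equal_CreateUtt2AgeDict : Prop := ∀ (u2a : List String), Dom_CreateUtt2AgeDict u2a → Pre_CreateUtt2AgeDict u2a → Spec_CreateUtt2AgeDict u2a (CreateUtt2AgeDict u2a)

-- ===== LEMMAS AND PROOFS =====

-- first token of a line
def pvKey (s : String) : String := PySem.List.pyGetD (PySem.Str.split₀ s) 0 ""
-- second token of a line
def pvVal (s : String) : String := PySem.List.pyGetD (PySem.Str.split₀ s) 1 ""
-- the first-occurrence association list, defined structurally from the front
def pvF : List String → List (String × String)
  | [] => []
  | x :: xs => (pvKey x, pvVal x) :: (pvF xs).filter (fun p => p.1 != pvKey x)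

-- keys of pvF are distinct
theorem pvF_keys_nodup (xs : List String) : ((pvF xs).map Prod.fst).Nodup := by
  induction xs with
  | nil => simp [pvF]
  | cons x xs ih =>
    simp only [pvF, List.map_cons, List.nodup_cons]
    constructor
    · intro hmem
      obtain ⟨p, hp, hpk⟩ := List.mem_map.mp hmem
      have := (List.mem_filter.mp hp).2
      simp [hpk] at this
    · exact ih.sublist (List.Sublist.map _ List.filter_sublist)

-- filtering a key out of the input commutes with pvF
theorem pvF_filter (k : String) (xs : List String) :
    pvF (xs.filter (fun s => pvKey s != k)) = (pvF xs).filter (fun p => p.1 != k) := by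
  induction xs with
  | nil => simp [pvF]
  | cons x xs ih =>
    by_cases hx : pvKey x = k
    · subst hx
      simp only [pvF, List.filter_cons, bne_self_eq_false, Bool.false_eq_true, if_false, ih,
        List.filter_filter, Bool.and_self]
    · have h1 : (pvKey x != k) = true := by simp [hx]
      simp only [pvF, List.filter_cons, h1, if_true, ih, List.filter_filter]
      congr 1
      apply List.filter_congr
      intro p _
      exact Bool.and_comm _ _

-- A's loop from any accumulator with distinct keys
theorem pvA_inv (xs : List String) (d : PySem.Dict String String) (hnd : d.keys.Nodup) :
    (xs.foldl (fun u2a_dict u_a =>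
        let utt := PySem.List.pyGetD (PySem.Str.split₀ u_a) 0 ""
        let age := PySem.List.pyGetD (PySem.Str.split₀ u_a) 1 ""
        if !(u2a_dict.contains utt) then u2a_dict.insert utt age else u2a_dict) d).items
      = d.items ++ (pvF xs).filter (fun p => !(d.contains p.1)) := by
  induction xs generalizing d with
  | nil => simp [pvF]
  | cons x xs ih =>
    simp only [List.foldl_cons, pvF]
    by_cases hc : d.contains (pvKey x) = true
    · rw [show (if !(d.contains (PySem.List.pyGetD (PySem.Str.split₀ x) 0 "")) then
          d.insert (PySem.List.pyGetD (PySem.Str.split₀ x) 0 "") (PySem.List.pyGetD (PySem.Str.split₀ x) 1 "") else d) = d by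
        simp [pvKey] at hc; simp [hc]]
      rw [ih d hnd]
      rw [List.filter_cons]
      have hk : (!(d.contains (pvKey x))) = false := by simp [hc]
      simp only [pvKey, pvVal] at hk ⊢
      rw [hk]
      simp only [Bool.false_eq_true, if_false, List.filter_filter]
      congr 1
      apply List.filter_congr
      intro p _
      by_cases hp : d.contains p.1 = true
      · simp [hp]
      · have : p.1 ≠ PySem.List.pyGetD (PySem.Str.split₀ x) 0 "" := by
          intro h; rw [h] at hp; simp [pvKey] at hc; exact hp hc
        simp [hp, this]
    · have hc' : d.contains (pvKey x) = false := by simpa using hc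
      rw [show (if !(d.contains (PySem.List.pyGetD (PySem.Str.split₀ x) 0 "")) then
          d.insert (PySem.List.pyGetD (PySem.Str.split₀ x) 0 "") (PySem.List.pyGetD (PySem.Str.split₀ x) 1 "") else d)
          = d.insert (pvKey x) (pvVal x) by
        simp [pvKey] at hc'; simp [hc', pvKey, pvVal]]
      rw [ih _ (PySem.Dict.nodup_keys_insert d _ _ hnd)]
      rw [PySem.Dict.items_insert, hc']
      simp only [Bool.false_eq_true, if_false]
      rw [List.filter_cons]
      have hk : (!(d.contains (pvKey x))) = true := by simp [hc']
      simp only [pvKey, pvVal] at hk ⊢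
      rw [hk]
      simp only [if_true, List.append_assoc, List.cons_append, List.nil_append,
        List.filter_filter]
      congr 2
      apply List.filter_congr
      intro p _
      rw [PySem.Dict.contains_insert]
      by_cases hp : p.1 = PySem.List.pyGetD (PySem.Str.split₀ x) 0 ""
      · simp [hp]
      · simp [bne, Bool.and_comm]

-- pvF_filter restated in the syntactic form appearing in B's unfolded body
theorem pvF_filter' (l : String) (xs : List String) :
    pvF (xs.filter (fun s => PySem.List.pyGetD (PySem.Str.split₀ s) 0 "" != PySem.List.pyGetD (PySem.Str.split₀ l) 0 ""))
      = (pvF xs).filter (fun p => p.1 != pvKey l) := pvF_filter (pvKey l) xs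

-- B's recursion computes pvF (induction on a length bound)
theorem pvB_eq_aux (n : Nat) : ∀ (xs : List String), xs.length ≤ n → CreateUtt2AgeDict_alt xs = pvF xs := by
  induction n with
  | zero =>
    intro xs h
    have hx : xs = [] := List.eq_nil_of_length_eq_zero (Nat.le_zero.mp h)
    subst hx; rw [CreateUtt2AgeDict_alt]; rfl
  | succ n ih =>
    intro xs h
    match xs with
    | [] => rw [CreateUtt2AgeDict_alt]; rfl
    | l :: ls =>
    rw [CreateUtt2AgeDict_alt]
    have hlen : (ls.filter (fun s => PySem.List.pyGetD (PySem.Str.split₀ s) 0 "" != PySem.List.pyGetD (PySem.Str.split₀ l) 0 "")).length ≤ n :=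
      le_trans (List.length_filter_le _ _) (Nat.le_of_succ_le_succ h)
    rw [ih _ hlen, pvF_filter' l]
    rw [PySem.Dict.items_foldl_insert_fresh (k := Prod.fst) (v := Prod.snd)]
    · simp [pvF, pvKey, pvVal, PySem.Dict.items_insert, PySem.Dict.empty]
    · intro p hp
      have := (List.mem_filter.mp hp).2
      rw [PySem.Dict.contains_insert]
      simpa [PySem.Dict.empty] using this
    · exact (pvF_keys_nodup ls).sublist (List.Sublist.map _ List.filter_sublist)

theorem pvB_eq (xs : List String) : CreateUtt2AgeDict_alt xs = pvF xs :=
  pvB_eq_aux xs.length xs le_rfl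

-- ===== VERDICT (by name: the statement is the Claim_ definition above) =====
theorem CreateUtt2AgeDict_spec : Claim_equal_CreateUtt2AgeDict := by
  intro u2a _ _
  show CreateUtt2AgeDict u2a = CreateUtt2AgeDict_alt u2a
  rw [pvB_eq]
  unfold CreateUtt2AgeDict
  rw [pvA_inv u2a PySem.Dict.empty (by simp)]
  simp [PySem.Dict.empty]
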